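-- pv_equiv track=rewrite | github.com/kelseysy1/thirdProject | python-projects/dictionary_practice.py | most_popular_foods
-- ===== SOURCE A (Python) =====
-- def most_popular_foods(fav_foods):
--
--     '''
--     Given a dictionary of people's favorite foods, return a new dictionary
--     with food as the key and the list of people who like that food as the value.
--     Example, given
--     fav_foods={'Kathleen': 'pizza', 'Steve': 'burger', 'John': 'steak',
--     'Michelle': 'pasta', 'Patrick': 'pizza'})
--     You should return the new dictionary
--     {'pizza': ['Kathleen', 'Patrick'], 'burger': ['Steve'], 'steak': ['John'],
--     'pasta': ['Michelle']}
--
--     Steps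
--     Create an empty dictionary
--     Iterate through the fav_foods dictionary
--         if the food is NOT in the new dictionary:
--             create an empty list and add the person to the list
--             add the food as they key and the list as the value
--         else:
--             add the person to the list of people who favorite that food
--     return dictionary
--     '''
--
--     #create empty dictionary to store result
--     swapped_foods = {}
--
--
--     #fav_foods={'Kathleen': 'pizza', 'Steve': 'burger', 'John': 'steak',
--     #'Michelle': 'pasta', 'Patrick': 'pizza'}
--
--
--
--     # Iterate through the fav_foods dictionary
--     for person, food in fav_foods.items():
--         # Check if the food is NOT in the new dictionary
--         if food not in swapped_foods:
--             # If not, create a new key-value pair with the food as the key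
--             # and a list containing the person as the value
--             swapped_foods[food] = [person]
--         else:
--             # If the food is already a key, all you have to do is append the person to the existing list
--             swapped_foods[food].append(person)
--
--     # Return the final dictionary
--     return swapped_foods
-- ===== SOURCE B (Python) =====
-- def most_popular_foods(fav_foods):
--     # Index-then-scan: first the distinct foods in first-appearance order,
--     # then for each food one full scan collecting its fans.
--     items = list(fav_foods.items())
--     foods = list(dict.fromkeys(f for _, f in items))
--     return {food: [p for p, f in items if f == food] for food in foods}
-- ===== Notes on version B (the rewrite author's own statement) =====
-- stated objective: idiomatic
-- what changed: Replaces the single accumulating dict-building pass (conditional insert/append per item) with an index-then-scan shape: compute the distinct foods once, then build the result with a dict comprehension whose inner scan re-filters all items per food.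
import Mathlib
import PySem

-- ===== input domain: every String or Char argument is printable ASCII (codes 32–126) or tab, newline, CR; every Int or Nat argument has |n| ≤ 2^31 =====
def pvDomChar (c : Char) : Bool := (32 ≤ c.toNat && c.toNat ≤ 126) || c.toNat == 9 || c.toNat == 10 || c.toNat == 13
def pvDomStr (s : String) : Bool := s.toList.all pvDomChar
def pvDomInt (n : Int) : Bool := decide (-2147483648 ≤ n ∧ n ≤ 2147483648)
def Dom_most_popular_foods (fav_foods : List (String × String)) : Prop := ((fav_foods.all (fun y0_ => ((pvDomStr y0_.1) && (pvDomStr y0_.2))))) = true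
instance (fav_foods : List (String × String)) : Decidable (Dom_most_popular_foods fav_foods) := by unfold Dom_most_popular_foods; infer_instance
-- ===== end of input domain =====

-- B replaces A's single accumulating dict-building pass by an index-then-scan shape
-- (distinct foods first, then one filter pass per food); objective: idiomatic.


-- ===== PORT A =====
-- one pass: if the food is not yet a key, insert [person]; else append person
def most_popular_foods (fav_foods : List (String × String)) : List (String × List String) :=
  (fav_foods.foldl
    (fun swapped pf =>
      if swapped.contains pf.2 = false then swapped.insert pf.2 [pf.1]
      else swapped.modify pf.2 [] (fun ys => ys ++ [pf.1]))
    PySem.Dict.empty).items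

-- ===== PORT B =====
-- distinct foods in first-appearance order, then one filter scan per food
def most_popular_foods_alt (fav_foods : List (String × String)) : List (String × List String) :=
  (PySem.List.dedup (fav_foods.map (fun pf => pf.2))).map
    (fun food => (food, (fav_foods.filter (fun pf => pf.2 == food)).map (fun pf => pf.1)))

-- ===== PRECONDITION & SPEC =====
def Spec_most_popular_foods (fav_foods : List (String × String)) (out : List (String × List String)) : Prop := out = most_popular_foods_alt fav_foods
instance (fav_foods : List (String × String)) (out : List (String × List String)) : Decidable (Spec_most_popular_foods fav_foods out) := by unfold Spec_most_popular_foods; infer_instance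

-- ===== CLAIM (what is proved, stated in full; the proofs are below) =====
def Claim_equal_most_popular_foods : Prop := ∀ (fav_foods : List (String × String)), Dom_most_popular_foods fav_foods → Spec_most_popular_foods fav_foods (most_popular_foods fav_foods)

-- ===== LEMMAS AND PROOFS =====

-- A's conditional insert/append step is exactly the unconditional modify-append step
theorem mpf_step_eq (d : PySem.Dict String (List String)) (pf : String × String) :
    (if d.contains pf.2 = false then d.insert pf.2 [pf.1]
     else d.modify pf.2 [] (fun ys => ys ++ [pf.1]))
    = d.modify pf.2 [] (fun ys => ys ++ [pf.1]) := by
  by_cases h : d.contains pf.2 = false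
  · simp only [h, if_pos]
    simp [PySem.Dict.modify, PySem.Dict.getD_of_not_contains d [] h]
  · simp [h]

-- A's fold is the modify-append fold over the swapped pairs
theorem mpf_fold_eq (fav_foods : List (String × String)) :
    fav_foods.foldl
      (fun swapped pf =>
        if swapped.contains pf.2 = false then swapped.insert pf.2 [pf.1]
        else swapped.modify pf.2 [] (fun ys => ys ++ [pf.1]))
      PySem.Dict.empty
    = (fav_foods.map (fun pf => (pf.2, pf.1))).foldl
        (fun d q => d.modify q.1 [] (fun ys => ys ++ [q.2])) PySem.Dict.empty := by
  rw [List.foldl_map]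
  exact PySem.List.foldl_congr_mem _ _ _ _ (fun d pf _ => mpf_step_eq d pf)

-- ===== VERDICT (by name: the statement is the Claim_ definition above) =====
theorem most_popular_foods_spec : Claim_equal_most_popular_foods := by
  intro fav_foods _
  unfold Spec_most_popular_foods most_popular_foods most_popular_foods_alt
  rw [mpf_fold_eq]
  set l := fav_foods.map (fun pf => (pf.2, pf.1)) with hl
  set D := l.foldl (fun d q => d.modify q.1 [] (fun ys => ys ++ [q.2])) PySem.Dict.empty with hD
  have hnd : D.keys.Nodup := by
    rw [hD]
    exact PySem.Dict.nodup_keys_foldl_modify_key l Prod.fst [] (fun _ q ys => ys ++ [q.2]) _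
      PySem.Dict.nodup_keys_empty
  rw [PySem.Dict.items_eq_map_keys D hnd []]
  have hkeys : D.keys = PySem.List.dedup (fav_foods.map (fun pf => pf.2)) := by
    rw [hD, PySem.Dict.keys_foldl_modify_key l Prod.fst [] (fun _ q ys => ys ++ [q.2]),
      PySem.Dict.keys_empty, PySem.List.dedup_eq_ofList, PySem.Set.ofList_eq_foldl, hl,
      List.map_map]
    rfl
  rw [hkeys]
  refine List.map_congr_left (fun k _ => ?_)
  rw [hD, PySem.Dict.getD_foldl_modify_append l PySem.Dict.empty k, PySem.Dict.getD_empty, hl,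
    List.filter_map, List.map_map]
  rfl
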